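-- pv_equiv track=rewrite | github.com/Das-rebel/ChuckleNet | convert_scraped_to_word_level.py | extract_last_non_empty_clause_tokens
-- ===== SOURCE A (Python) =====
-- from typing import Dict, List, Optional, Tuple
--
-- def is_punctuation_token(token: str) -> bool:
--     return bool(token) and all(not char.isalnum() for char in token)
--
-- def extract_last_non_empty_clause_tokens(context_words: List[str]) -> List[str]:
--     clause_tokens: List[List[str]] = [[]]
--     for token in context_words:
--         if is_punctuation_token(token):
--             clause_tokens.append([])
--             continue
--         clause_tokens[-1].append(token)
--     non_empty = [clause for clause in clause_tokens if clause]
--     return list(non_empty[-1]) if non_empty else []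
-- ===== SOURCE B (Python) =====
-- from typing import List
--
-- def is_punctuation_token(token: str) -> bool:
--     return bool(token) and all(not char.isalnum() for char in token)
--
-- def extract_last_non_empty_clause_tokens(context_words: List[str]) -> List[str]:
--     i = len(context_words) - 1
--     # skip trailing punctuation tokens
--     while i >= 0 and is_punctuation_token(context_words[i]):
--         i -= 1
--     # collect the last clause backwards
--     buf: List[str] = []
--     while i >= 0 and not is_punctuation_token(context_words[i]):
--         buf.append(context_words[i])
--         i -= 1
--     buf.reverse()
--     return buf
-- ===== Notes on version B (the rewrite author's own statement) =====
-- stated objective: alternative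
-- what changed: B scans context_words backwards from the end (skip trailing punctuation tokens, then collect tokens until the next punctuation token and reverse) instead of building the full forward list of clauses and filtering the non-empty ones.
import Mathlib
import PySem

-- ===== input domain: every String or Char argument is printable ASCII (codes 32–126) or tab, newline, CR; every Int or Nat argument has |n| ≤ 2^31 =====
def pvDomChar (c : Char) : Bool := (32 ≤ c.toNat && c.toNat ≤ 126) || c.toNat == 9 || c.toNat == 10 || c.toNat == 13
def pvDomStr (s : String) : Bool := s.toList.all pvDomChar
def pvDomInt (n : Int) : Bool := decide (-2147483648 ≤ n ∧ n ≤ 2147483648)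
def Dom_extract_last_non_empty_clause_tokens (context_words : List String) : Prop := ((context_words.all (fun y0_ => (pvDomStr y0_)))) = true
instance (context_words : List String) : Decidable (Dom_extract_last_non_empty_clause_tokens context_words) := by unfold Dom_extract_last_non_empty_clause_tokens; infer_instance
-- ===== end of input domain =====

-- B replaces A's forward clause-list construction by a backward scan from the end
-- (skip trailing punctuation, collect the last clause, reverse); return value proved equal.


-- ===== PORT A =====
-- is_punctuation_token: nonempty and every character not alphanumeric (shared helper of both Pythons)
def is_punct (token : String) : Bool :=
  !token.toList.isEmpty && token.toList.all (fun c => !PySem.Chars.isalnum c)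

-- one iteration of A's for-loop; clause_tokens[-1].append(token) is ported as
-- "drop the last clause, re-append it extended by token"
def stepA (acc : List (List String)) (t : String) : List (List String) :=
  if is_punct t then acc ++ [[]]
  else acc.dropLast ++ [acc.getLastD [] ++ [t]]

def extract_last_non_empty_clause_tokens (context_words : List String) : List String :=
  let clause_tokens := context_words.foldl stepA [[]]
  let non_empty := clause_tokens.filter (fun c => !c.isEmpty)
  non_empty.getLastD []

-- ===== PORT B =====
-- first while-loop of Source B: walk backwards past trailing punctuation tokens
def skipPunct : List String → List String
  | [] => []
  | t :: rest => if is_punct t then skipPunct rest else t :: rest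

-- second while-loop of Source B: collect tokens backwards until a punctuation token
def collectClause : List String → List String
  | [] => []
  | t :: rest => if is_punct t then [] else t :: collectClause rest

def extract_last_non_empty_clause_tokens_alt (context_words : List String) : List String :=
  (collectClause (skipPunct context_words.reverse)).reverse

-- ===== PRECONDITION & SPEC =====
def Spec_extract_last_non_empty_clause_tokens (context_words : List String) (out : List String) : Prop := out = extract_last_non_empty_clause_tokens_alt context_words
instance (context_words : List String) (out : List String) : Decidable (Spec_extract_last_non_empty_clause_tokens context_words out) := by unfold Spec_extract_last_non_empty_clause_tokens; infer_instance

-- ===== CLAIM (what is proved, stated in full; the proofs are below) =====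
def Claim_equal_extract_last_non_empty_clause_tokens : Prop := ∀ (context_words : List String), Dom_extract_last_non_empty_clause_tokens context_words → Spec_extract_last_non_empty_clause_tokens context_words (extract_last_non_empty_clause_tokens context_words)

-- ===== LEMMAS AND PROOFS =====

-- Combined invariant, by induction from the right: the current (last) clause of A's fold
-- state is the reversed backward-collected clause of the processed prefix, and A's final
-- answer on that prefix equals B's.
theorem main_invariant (xs : List String) :
    ((xs.foldl stepA [[]]).getLastD [] = (collectClause xs.reverse).reverse) ∧
    (((xs.foldl stepA [[]]).filter (fun c => !c.isEmpty)).getLastD []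
      = (collectClause (skipPunct xs.reverse)).reverse) := by
  induction xs using List.reverseRecOn with
  | nil => simp [collectClause, skipPunct]
  | append_singleton xs t ih =>
    obtain ⟨ih1, ih2⟩ := ih
    rw [List.foldl_append, List.foldl_cons, List.foldl_nil, List.reverse_append,
      List.reverse_singleton, List.singleton_append]
    by_cases h : is_punct t = true
    · rw [show stepA (xs.foldl stepA [[]]) t = xs.foldl stepA [[]] ++ [[]] by
        simp [stepA, h]]
      constructor
      · rw [List.getLastD_concat]
        simp [collectClause, h]
      · rw [List.filter_append, show skipPunct (t :: xs.reverse) = skipPunct xs.reverse by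
          simp [skipPunct, h]]
        simpa using ih2
    · rw [show stepA (xs.foldl stepA [[]]) t
          = (xs.foldl stepA [[]]).dropLast ++ [(xs.foldl stepA [[]]).getLastD [] ++ [t]] by
        simp [stepA, h]]
      have hcoll : (collectClause (t :: xs.reverse)).reverse
          = (xs.foldl stepA [[]]).getLastD [] ++ [t] := by
        rw [show collectClause (t :: xs.reverse) = t :: collectClause xs.reverse by
            simp [collectClause, h],
          List.reverse_cons, ← ih1]
      constructor
      · rw [List.getLastD_concat, hcoll]
      · rw [List.filter_append, show skipPunct (t :: xs.reverse) = t :: xs.reverse by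
          simp [skipPunct, h]]
        simp [hcoll]

-- ===== VERDICT (by name: the statement is the Claim_ definition above) =====
theorem extract_last_non_empty_clause_tokens_spec : Claim_equal_extract_last_non_empty_clause_tokens := by
  intro xs _
  unfold Spec_extract_last_non_empty_clause_tokens extract_last_non_empty_clause_tokens
    extract_last_non_empty_clause_tokens_alt
  exact (main_invariant xs).2
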